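-- pv_equiv track=rewrite | github.com/hmarjal/client_py | parity.py | check_parity
-- ===== SOURCE A (Python) =====
-- def get_parity(n) -> int:
--     while n > 1:
--         n = (n >> 1) ^ (n & 1)
--     return n
--
-- def check_parity(msg) -> bool:
--     if isinstance(msg, bytes):
--         msg = msg.decode('utf-8')
--     for c in msg:
--         c = ord(c)
--         parity_bit = (c & 1)
--         c >>= 1
--         parity_check = get_parity(c)
--         if parity_check != parity_bit:
--             return False
--     return True
-- ===== SOURCE B (Python) =====
-- def check_parity(msg) -> bool:
--     if isinstance(msg, bytes):
--         msg = msg.decode('utf-8')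
--     return all(bin(ord(c)).count("1") % 2 == 0 for c in msg)
-- ===== Notes on version B (the rewrite author's own statement) =====
-- stated objective: simpler
-- what changed: Replaces the per-char split into parity bit plus an XOR-folding while-loop (get_parity) with a single global popcount-parity test per character (even number of set bits), removing the helper and the loop.
import Mathlib
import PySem

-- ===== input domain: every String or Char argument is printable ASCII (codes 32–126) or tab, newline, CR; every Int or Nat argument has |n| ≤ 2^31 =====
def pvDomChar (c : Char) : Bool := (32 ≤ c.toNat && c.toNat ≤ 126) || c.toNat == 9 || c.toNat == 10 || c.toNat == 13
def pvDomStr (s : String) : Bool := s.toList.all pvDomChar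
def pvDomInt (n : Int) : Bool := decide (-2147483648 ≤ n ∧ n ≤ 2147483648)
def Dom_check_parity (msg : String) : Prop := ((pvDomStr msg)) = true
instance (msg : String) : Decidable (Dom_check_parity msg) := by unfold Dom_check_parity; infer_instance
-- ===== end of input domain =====

-- B replaces A's parity-bit/XOR-fold split with a single even-popcount test per character (objective: simpler).
-- The ports take a String, so A's 'bytes' branch (decode then proceed identically) is outside the ported signature.

-- ===== PORT A =====
-- while n > 1: n = (n >> 1) ^ (n & 1)   (n is a character code, hence a Nat);
-- the extra fuel argument (starting at n, which bounds the iteration count) only makes the loop total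
def get_parity_go : Nat → Nat → Nat
  | 0, n => n
  | fuel + 1, n => if 1 < n then get_parity_go fuel ((n >>> 1) ^^^ (n &&& 1)) else n

def get_parity (n : Nat) : Nat := get_parity_go n n

-- the for-loop with early return False
def check_parity_go : List Char → Bool
  | [] => true
  | c :: rest =>
    let n := c.toNat
    let parity_bit := n &&& 1
    let n2 := n >>> 1
    let parity_check := get_parity n2
    if parity_check != parity_bit then false else check_parity_go rest

def check_parity (msg : String) : Bool := check_parity_go msg.toList

-- ===== PORT B =====
-- bin(n).count("1"): number of set bits of n
-- fuel (starting at n, which bounds the iteration count) only makes the recursion total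
def popcount_go : Nat → Nat → Nat
  | 0, _ => 0
  | fuel + 1, n => if n = 0 then 0 else popcount_go fuel (n >>> 1) + (n &&& 1)

def popcount_bin (n : Nat) : Nat := popcount_go n n

def check_parity_alt (msg : String) : Bool :=
  msg.toList.all (fun c => popcount_bin c.toNat % 2 == 0)

-- ===== PRECONDITION & SPEC =====
def Spec_check_parity (msg : String) (out : Bool) : Prop := out = check_parity_alt msg
instance (msg : String) (out : Bool) : Decidable (Spec_check_parity msg out) := by unfold Spec_check_parity; infer_instance

-- ===== CLAIM (what is proved, stated in full; the proofs are below) =====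
def Claim_equal_check_parity : Prop := ∀ (msg : String), Dom_check_parity msg → Spec_check_parity msg (check_parity msg)

-- ===== LEMMAS AND PROOFS =====

-- per-character agreement on all codes the domain admits, by evaluation
theorem pv_key : ∀ n : Nat, n < 128 →
    ((get_parity (n >>> 1) != (n &&& 1)) = !(popcount_bin n % 2 == 0)) := by decide

theorem pv_domChar_lt (c : Char) (h : pvDomChar c = true) : c.toNat < 128 := by
  simp [pvDomChar] at h; omega

theorem pv_go_eq_all (l : List Char) (h : l.all pvDomChar = true) :
    check_parity_go l = l.all (fun c => popcount_bin c.toNat % 2 == 0) := by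
  induction l with
  | nil => rfl
  | cons c rest ih =>
    simp only [List.all_cons, Bool.and_eq_true] at h
    have hc := pv_key c.toNat (pv_domChar_lt c h.1)
    simp only [check_parity_go, List.all_cons, hc, ih h.2]
    cases popcount_bin c.toNat % 2 == 0 <;> simp

-- ===== VERDICT (by name: the statement is the Claim_ definition above) =====
theorem check_parity_spec : Claim_equal_check_parity := by
  intro msg hdom
  unfold Spec_check_parity check_parity check_parity_alt
  exact pv_go_eq_all msg.toList hdom
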